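-- pv_equiv track=rewrite | github.com/rdd48/practice | rosalind_exercises/speed_up_motif_search.py | get_max_substr
-- ===== SOURCE A (Python) =====
-- def get_max_substr(sub_str, base_str):
--     sub_str = sub_str[::-1]
--     base_str = base_str[::-1]
--     best_score = 0
--     for i in range(1,len(sub_str)+1):
--         if sub_str[0:i] == base_str[-i:]:
--             best_score = i
--     return(best_score)
-- ===== SOURCE B (Python) =====
-- def get_max_substr(sub_str, base_str):
--     # Single left-to-right pass over sub_str maintaining the set of start
--     # positions whose character-by-character match against a prefix of
--     # base_str is still alive; the smallest surviving start position gives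
--     # the longest suffix-of-sub / prefix-of-base overlap.  No reversal, no
--     # slice comparisons.
--     m = len(base_str)
--     cands = []
--     for i, c in enumerate(sub_str):
--         cands = [p for p in cands if i - p < m and base_str[i - p] == c]
--         if m and base_str[0] == c:
--             cands.append(i)
--     return len(sub_str) - cands[0] if cands else 0
-- ===== Notes on version B (the rewrite author's own statement) =====
-- stated objective: alternative
-- what changed: A reverses both strings and, for every overlap length i, builds and compares two fresh slices; B makes a single left-to-right pass over sub_str maintaining the list of start positions whose character-by-character match against a prefix of base_str is still alive, and returns len(sub_str) minus the smallest surviving start.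
import Mathlib
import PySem

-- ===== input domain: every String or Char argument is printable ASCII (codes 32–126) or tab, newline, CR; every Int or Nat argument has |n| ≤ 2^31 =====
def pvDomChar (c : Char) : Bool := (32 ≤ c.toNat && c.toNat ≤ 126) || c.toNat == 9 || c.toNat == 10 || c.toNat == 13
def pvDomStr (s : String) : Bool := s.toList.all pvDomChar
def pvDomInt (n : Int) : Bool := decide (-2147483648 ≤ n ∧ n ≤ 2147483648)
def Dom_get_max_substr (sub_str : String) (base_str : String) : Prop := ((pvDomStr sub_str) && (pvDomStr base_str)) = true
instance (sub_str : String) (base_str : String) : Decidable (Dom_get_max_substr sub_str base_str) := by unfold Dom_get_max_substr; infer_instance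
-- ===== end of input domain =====

-- B replaces A's reverse-both-strings per-length slice comparison by a single left-to-right pass
-- over sub_str that maintains the list of start positions whose match against a prefix of
-- base_str is still alive; the smallest surviving start gives the longest overlap
-- (objective: alternative algorithm — no reversal, no slice comparisons, one incremental pass).

-- ===== PORT A =====
-- A reverses both strings (s[::-1]; step -1 ≠ 0, so slice? is always `some` and the getD "" never fires),
-- then for i in range(1, len(sub')+1) keeps the last i with sub'[0:i] == base'[-i:].
def get_max_substr (sub_str : String) (base_str : String) : Int :=
  let sub' := (PySem.Str.slice? sub_str none none (-1)).getD ""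
  let base' := (PySem.Str.slice? base_str none none (-1)).getD ""
  (PySem.List.pyRange 1 (PySem.Str.len sub' + 1) 1).foldl
    (fun best_score i =>
      if PySem.Str.slice sub' (some 0) (some i) = PySem.Str.slice base' (some (-i)) none
      then i else best_score) 0

-- ===== PORT B =====
-- the loop body of Source B: filter the live start positions by the next character of sub_str,
-- then append the new candidate i when base_str[0] matches (indexing is guarded in range).
def pvStepB (bl : List Char) (st : Nat × List Nat) (c : Char) : Nat × List Nat :=
  let i := st.1
  let cands := st.2.filter (fun p => decide (i - p < bl.length) && (bl[i - p]? == some c))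
  (i + 1, if bl[0]? == some c then cands ++ [i] else cands)

def get_max_substr_alt (sub_str : String) (base_str : String) : Int :=
  let sl := sub_str.toList
  let bl := base_str.toList
  let cands := (sl.foldl (pvStepB bl) (0, [])).2
  match cands with
  | [] => 0
  | p :: _ => (sl.length : Int) - (p : Int)

-- ===== PRECONDITION & SPEC =====
def Spec_get_max_substr (sub_str : String) (base_str : String) (out : Int) : Prop := out = get_max_substr_alt sub_str base_str
instance (sub_str : String) (base_str : String) (out : Int) : Decidable (Spec_get_max_substr sub_str base_str out) := by unfold Spec_get_max_substr; infer_instance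

-- ===== CLAIM (what is proved, stated in full; the proofs are below) =====
def Claim_equal_get_max_substr : Prop := ∀ (sub_str : String) (base_str : String), Dom_get_max_substr sub_str base_str → Spec_get_max_substr sub_str base_str (get_max_substr sub_str base_str)

-- ===== LEMMAS AND PROOFS =====

-- "largest k ≤ j with c k, else 0", computed as descending first hit — the value of A's fold
def dfirst (c : Nat → Bool) : Nat → Int
  | 0 => 0
  | k + 1 => if c (k + 1) then ((k + 1 : Nat) : Int) else dfirst c k

lemma dfirst_congr (c c' : Nat → Bool) (j : Nat)
    (h : ∀ k, 1 ≤ k → k ≤ j → c k = c' k) : dfirst c j = dfirst c' j := by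
  induction j with
  | zero => rfl
  | succ t ih =>
    simp only [dfirst, h (t + 1) (by omega) (by omega)]
    rw [ih (fun k h1 h2 => h k h1 (by omega))]

-- A's ascending "keep the last hit" fold over range(1, j+1) is the descending first hit
lemma foldlA_eq_dfirst (sub' base' : String) (j : Nat) :
    (PySem.List.pyRange 1 ((j : Int) + 1) 1).foldl
      (fun best_score i =>
        if PySem.Str.slice sub' (some 0) (some i) = PySem.Str.slice base' (some (-i)) none
        then i else best_score) 0
    = dfirst (fun k => decide (PySem.Str.slice sub' (some 0) (some (k : Int))
        = PySem.Str.slice base' (some (-(k : Int))) none)) j := by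
  induction j with
  | zero => rw [PySem.List.pyRange_one_eq_nil (by omega)]; rfl
  | succ t ih =>
    have hcast : ((t + 1 : Nat) : Int) + 1 = ((t : Int) + 1) + 1 := by push_cast; ring
    rw [hcast, PySem.List.pyRange_one_succ_right (by omega), List.foldl_append, ih]
    have hc : ((t + 1 : Nat) : Int) = (t : Int) + 1 := by push_cast; ring
    simp only [List.foldl_cons, List.foldl_nil, dfirst, decide_eq_true_eq, hc]

-- A's condition at i = k (1 ≤ k ≤ len sub), moved to the un-reversed character lists
lemma condA_iff (sl bl : List Char) (k : Nat) (hk : 1 ≤ k) :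
    (PySem.List.slice sl.reverse (some (0 : Int)) (some (k : Int))
        = PySem.List.slice bl.reverse (some (-(k : Int))) none)
      ↔ sl.drop (sl.length - k) = bl.take (bl.length - (bl.length - k)) := by
  rw [PySem.List.slice_zero_start, PySem.List.slice_to_natCast,
      PySem.List.slice_from_neg_natCast _ _ hk, List.length_reverse,
      List.take_reverse, List.drop_reverse, List.reverse_inj]

-- the drop/take equation is false for len(base) < k ≤ len(sub)
lemma cond_false_of_big (sl bl : List Char) (k : Nat) (hkn : k ≤ sl.length)
    (hm : bl.length < k) :
    ¬ (sl.drop (sl.length - k) = bl.take (bl.length - (bl.length - k))) := by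
  intro h
  have := congrArg List.length h
  simp [List.length_drop, List.length_take] at this
  omega

-- the live-candidate list after consuming the prefix u of sub_str
def liveC (bl u : List Char) : List Nat :=
  (List.range u.length).filter
    (fun p => decide (u.length - p ≤ bl.length) && decide (u.drop p = bl.take (u.length - p)))

lemma liveC_step (bl u : List Char) (c : Char) :
    liveC bl (u ++ [c]) = (pvStepB bl (u.length, liveC bl u) c).2 := by
  unfold liveC pvStepB
  simp only [List.length_append, List.length_singleton, List.filter_filter]
  rw [List.range_succ, List.filter_append]
  have hmain : ∀ p ∈ List.range u.length,
      (decide (u.length + 1 - p ≤ bl.length) &&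
        decide ((u ++ [c]).drop p = bl.take (u.length + 1 - p)))
      = (decide (u.length - p < bl.length) && (bl[u.length - p]? == some c) &&
         (decide (u.length - p ≤ bl.length) && decide (u.drop p = bl.take (u.length - p)))) := by
    intro p hp
    rw [List.mem_range] at hp
    rw [List.drop_append_of_le_length (by omega), Bool.eq_iff_iff]
    simp only [Bool.and_eq_true, decide_eq_true_eq, beq_iff_eq]
    constructor
    · rintro ⟨hle, heq⟩
      have hlt : u.length - p < bl.length := by omega
      have htake : bl.take (u.length + 1 - p)
          = bl.take (u.length - p) ++ [bl[u.length - p]] := by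
        have he : u.length + 1 - p = (u.length - p) + 1 := by omega
        rw [he, List.take_add_one, List.getElem?_eq_getElem hlt]
        simp
      rw [htake, ← List.concat_eq_append, ← List.concat_eq_append, List.concat_inj] at heq
      exact ⟨⟨hlt, by rw [List.getElem?_eq_getElem hlt, heq.2]⟩, by omega, heq.1⟩
    · rintro ⟨⟨hlt, hgc⟩, hle, heq⟩
      rw [List.getElem?_eq_getElem hlt, Option.some.injEq] at hgc
      refine ⟨by omega, ?_⟩
      have he : u.length + 1 - p = (u.length - p) + 1 := by omega
      rw [he, List.take_add_one, List.getElem?_eq_getElem hlt, heq, hgc]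
      simp
  rw [List.filter_congr hmain]
  -- the fresh candidate p = u.length
  have hnew : (decide (u.length + 1 - u.length ≤ bl.length) &&
      decide ((u ++ [c]).drop u.length = bl.take (u.length + 1 - u.length)))
      = (bl[0]? == some c) := by
    have hd : (u ++ [c]).drop u.length = [c] := by
      rw [List.drop_append_of_le_length (le_refl _)]; simp
    have he : u.length + 1 - u.length = 1 := by omega
    rw [he, hd, Bool.eq_iff_iff]
    simp only [Bool.and_eq_true, decide_eq_true_eq, beq_iff_eq]
    cases bl with
    | nil => simp
    | cons b bs =>
      simp only [List.take_succ_cons, List.length_cons,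
        List.getElem?_cons_zero, Option.some.injEq, List.cons.injEq]
      constructor
      · rintro ⟨_, hcb, _⟩; rw [hcb]
      · intro hbc; exact ⟨by omega, hbc.symm, by simp⟩
  rw [List.filter_singleton, hnew]
  by_cases hc0 : (bl[0]? == some c) = true <;> simp [hc0]

lemma foldlB_inv (bl : List Char) : ∀ (rest u : List Char),
    rest.foldl (pvStepB bl) (u.length, liveC bl u)
      = ((u ++ rest).length, liveC bl (u ++ rest)) := by
  intro rest
  induction rest with
  | nil => intro u; simp
  | cons c cs ih =>
    intro u
    rw [List.foldl_cons]
    have hstep : pvStepB bl (u.length, liveC bl u) c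
        = ((u ++ [c]).length, liveC bl (u ++ [c])) := by
      rw [liveC_step]
      unfold pvStepB
      simp
    rw [hstep, ih (u ++ [c])]
    simp

-- descending first hit = n minus the first surviving start position
lemma dfirst_eq_filter_head (c : Nat → Bool) (n : Nat) :
    dfirst c n = (match (List.range n).filter (fun p => c (n - p)) with
      | [] => 0
      | p :: _ => (n : Int) - (p : Int)) := by
  induction n generalizing c with
  | zero => rfl
  | succ t ih =>
    have hr : List.range (t + 1) = 0 :: (List.range t).map Nat.succ := List.range_succ_eq_map
    rw [hr]
    simp only [List.filter_cons, Nat.sub_zero]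
    have hmap : ((List.range t).map Nat.succ).filter (fun p => c (t + 1 - p))
        = ((List.range t).filter (fun p => c (t - p))).map Nat.succ := by
      rw [List.filter_map]
      congr 1
      apply List.filter_congr
      intro p hp
      rw [List.mem_range] at hp
      simp only [Function.comp]
      congr 1
      omega
    rw [hmap]
    show dfirst c (t + 1) = _
    by_cases hc : c (t + 1)
    · simp only [dfirst, hc, if_pos]
      push_cast; ring_nf
    · simp only [dfirst, hc, if_false, Bool.false_eq_true]
      rw [ih c]
      cases hfe : (List.range t).filter (fun p => c (t - p)) with
      | nil => simp
      | cons p ps =>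
        simp only [List.map_cons]
        push_cast; ring_nf

-- ===== VERDICT (by name: the statement is the Claim_ definition above) =====
theorem get_max_substr_spec : Claim_equal_get_max_substr := by
  intro sub_str base_str _
  unfold Spec_get_max_substr get_max_substr get_max_substr_alt
  rw [PySem.Str.slice?_none_none_neg_one, PySem.Str.slice?_none_none_neg_one]
  simp only [Option.getD_some]
  set sl := sub_str.toList with hsl
  set bl := base_str.toList with hbl
  have hlen : PySem.Str.len (String.ofList sl.reverse) + 1 = ((sl.length : Int)) + 1 := by
    rw [PySem.Str.len_eq, String.toList_ofList, List.length_reverse]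
  rw [hlen]
  refine (foldlA_eq_dfirst (String.ofList sl.reverse) (String.ofList bl.reverse) sl.length).trans ?_
  -- B's fold produces the live-candidate list of the whole sub_str
  have hB : sl.foldl (pvStepB bl) (0, []) = (sl.length, liveC bl sl) := by
    have := foldlB_inv bl sl []
    simpa using this
  rw [hB]
  -- A's condition, as the drop/take boolean
  have hA : ∀ k : Nat, 1 ≤ k → k ≤ sl.length →
      decide (PySem.Str.slice (String.ofList sl.reverse) (some 0) (some (k : Int))
          = PySem.Str.slice (String.ofList bl.reverse) (some (-(k : Int))) none)
        = decide (sl.drop (sl.length - k) = bl.take (bl.length - (bl.length - k))) := by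
    intro k hk _
    rw [decide_eq_decide, String.ext_iff, PySem.Str.toList_slice, PySem.Str.toList_slice,
      PySem.Chars.slice_eq_listSlice, PySem.Chars.slice_eq_listSlice,
      String.toList_ofList, String.toList_ofList]
    exact condA_iff sl bl k hk
  rw [dfirst_congr _ _ sl.length hA, dfirst_eq_filter_head]
  -- the two filters agree pointwise on range (len sl)
  have hfilters : (List.range sl.length).filter
        (fun p => decide (sl.drop (sl.length - (sl.length - p))
            = bl.take (bl.length - (bl.length - (sl.length - p)))))
      = liveC bl sl := by
    unfold liveC
    apply List.filter_congr
    intro p hp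
    rw [List.mem_range] at hp
    have hpp : sl.length - (sl.length - p) = p := by omega
    rw [hpp]
    by_cases hle : sl.length - p ≤ bl.length
    · have : bl.length - (bl.length - (sl.length - p)) = sl.length - p := by omega
      rw [this]
      simp [hle]
    · have h := cond_false_of_big sl bl (sl.length - p) (by omega) (by omega)
      rw [hpp] at h
      rw [decide_eq_false hle, Bool.false_and, decide_eq_false h]
  rw [hfilters]
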